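-- pv_equiv track=rewrite | github.com/JakobSar/GameTheoryApp | App.py | weakly_dominant_row
-- ===== SOURCE A (Python) =====
-- def weakly_dominant_row(payoffs, rows, cols):
--     """Gibt die Zeilenstrategie zurück, die alle anderen Zeilen schwach dominiert (oder None)."""
--     for r in rows:
--         dominates_all = True
--         for r2 in rows:
--             if r2 == r:
--                 continue
--             strictly_better_exists = False
--             for c in cols:
--                 if payoffs[(r, c)][0] < payoffs[(r2, c)][0]:
--                     dominates_all = False
--                     break
--                 if payoffs[(r, c)][0] > payoffs[(r2, c)][0]:
--                     strictly_better_exists = True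
--             else:
--                 # Schleife nicht abgebrochen: r >= r2 für alle c
--                 if not strictly_better_exists:
--                     dominates_all = False
--             if not dominates_all:
--                 break
--         if dominates_all:
--             return r
--     return None
-- ===== SOURCE B (Python) =====
-- def weakly_dominant_row(payoffs, rows, cols):
--     """Gibt die Zeilenstrategie zurück, die alle anderen Zeilen schwach dominiert (oder None)."""
--     distinct = []
--     for r in rows:
--         if r not in distinct:
--             distinct.append(r)
--     if len(distinct) <= 1:
--         return rows[0] if rows else None
--     colmax = [max(payoffs[(r, c)][0] for r in distinct) for c in cols]
--     best = [r for r in distinct if [payoffs[(r, c)][0] for c in cols] == colmax]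
--     return best[0] if len(best) == 1 else None
-- ===== Notes on version B (the rewrite author's own statement) =====
-- stated objective: alternative
-- what changed: Replaces A's triple loop (every row checked pairwise against every other row per column) by one column-wise maximum vector: the dominant row is the unique distinct row whose payoff vector equals that column-max vector.
import Mathlib
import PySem

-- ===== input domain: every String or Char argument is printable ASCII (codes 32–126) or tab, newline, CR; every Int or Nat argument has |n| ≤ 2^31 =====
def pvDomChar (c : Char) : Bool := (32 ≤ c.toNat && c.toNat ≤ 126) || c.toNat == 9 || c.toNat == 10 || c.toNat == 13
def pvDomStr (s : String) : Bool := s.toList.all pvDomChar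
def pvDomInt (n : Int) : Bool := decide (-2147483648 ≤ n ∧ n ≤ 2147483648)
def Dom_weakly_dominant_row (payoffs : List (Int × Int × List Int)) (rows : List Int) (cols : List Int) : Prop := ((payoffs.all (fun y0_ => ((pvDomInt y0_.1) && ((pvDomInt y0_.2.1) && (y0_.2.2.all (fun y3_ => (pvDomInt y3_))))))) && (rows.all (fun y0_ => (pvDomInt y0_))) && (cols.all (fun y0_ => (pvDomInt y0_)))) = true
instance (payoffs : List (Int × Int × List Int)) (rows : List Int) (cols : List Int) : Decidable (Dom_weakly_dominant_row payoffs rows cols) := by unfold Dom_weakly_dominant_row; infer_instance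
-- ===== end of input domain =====

-- B replaces A's row-vs-row pairwise scan by one column-wise maximum vector and a single
-- membership/uniqueness pass over the distinct row labels (objective: alternative algorithm).

-- ===== PORT A =====
-- payoffs[(r, c)]: the dict lookup is the FIRST matching triple (key); payoffs[(r,c)][0] is its
-- value list's head.  A KeyError / IndexError (no match / empty list) is excluded by
-- Pre_weakly_dominant_row; there this total helper is exact, outside nothing is claimed.
def pvVal (payoffs : List (Int × Int × List Int)) (r c : Int) : Int :=
  ((((payoffs.find? (fun t => t.1 == r && t.2.1 == c)).map (fun t => t.2.2)).getD []).headD 0)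

-- inner 'for c in cols' loop with its for-else: returns the value of dominates_all after
-- this r2 (false on break; on normal exit, true iff strictly_better_exists)
def wdrInner (payoffs : List (Int × Int × List Int)) (r r2 : Int) :
    List Int → Bool → Bool
  | [], sbe => sbe
  | c :: cs, sbe =>
    if pvVal payoffs r c < pvVal payoffs r2 c then false
    else wdrInner payoffs r r2 cs (sbe || decide (pvVal payoffs r c > pvVal payoffs r2 c))

-- middle 'for r2 in rows' loop: dominates_all after scanning the list (break when it turns false)
def wdrMid (payoffs : List (Int × Int × List Int)) (r : Int) (cols : List Int) :
    List Int → Bool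
  | [] => true
  | r2 :: rest =>
    if r2 = r then wdrMid payoffs r cols rest
    else if wdrInner payoffs r r2 cols false then wdrMid payoffs r cols rest
    else false

-- outer 'for r in rows' loop with its early return
def wdrOuter (payoffs : List (Int × Int × List Int)) (rows cols : List Int) :
    List Int → Option Int
  | [] => none
  | r :: rest => if wdrMid payoffs r cols rows then some r else wdrOuter payoffs rows cols rest

def weakly_dominant_row (payoffs : List (Int × Int × List Int)) (rows : List Int) (cols : List Int) : Option Int :=
  wdrOuter payoffs rows cols rows

-- ===== PORT B =====
-- first-occurrence list of the distinct row labels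
def wdrDistinct (rows : List Int) : List Int :=
  rows.foldl (fun acc r => if r ∈ acc then acc else acc ++ [r]) []

-- max(payoffs[(r, c)][0] for r in distinct): Python max of a nonempty sequence (distinct has
-- length ≥ 2 where this is used; the .getD 0 default is never reached there)
def wdrColMax (payoffs : List (Int × Int × List Int)) (d : List Int) (c : Int) : Int :=
  (PySem.List.max? (d.map (fun r => pvVal payoffs r c)) (fun x => x)).getD 0

def weakly_dominant_row_alt (payoffs : List (Int × Int × List Int)) (rows : List Int) (cols : List Int) : Option Int :=
  let d := wdrDistinct rows
  if d.length ≤ 1 then rows.head?   -- rows[0] if rows else None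
  else
    let colmax := cols.map (fun c => wdrColMax payoffs d c)
    let best := d.filter (fun r => cols.map (fun c => pvVal payoffs r c) == colmax)
    if best.length == 1 then best.head? else none   -- best[0] if len(best) == 1 else None

-- ===== PRECONDITION & SPEC =====
-- Pre_ excludes inputs on which either Python hits a KeyError/IndexError: when rows carries at
-- least two distinct labels the payoff matrix must be complete over rows × cols with nonempty
-- value tuples (A returns on a few incomplete matrices thanks to its lazy short-circuit lookups —
-- those are excluded too, B's single full pass naturally raises there; see the cites).
def Pre_weakly_dominant_row (payoffs : List (Int × Int × List Int)) (rows : List Int) (cols : List Int) : Prop :=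
  (∀ r ∈ rows, ∀ r' ∈ rows, r = r') ∨
  (∀ r ∈ rows, ∀ c ∈ cols,
    (((payoffs.find? (fun t => t.1 == r && t.2.1 == c)).map (fun t => t.2.2)).getD []) ≠ [])
instance (payoffs : List (Int × Int × List Int)) (rows : List Int) (cols : List Int) : Decidable (Pre_weakly_dominant_row payoffs rows cols) := by unfold Pre_weakly_dominant_row; infer_instance

def pvWitness_weakly_dominant_row : (List (Int × Int × List Int)) × List Int × List Int :=
  ([(0, 0, [1, 1]), (1, 0, [0, 2])], [0, 1], [0])

def Spec_weakly_dominant_row (payoffs : List (Int × Int × List Int)) (rows : List Int) (cols : List Int) (out : Option Int) : Prop := out = weakly_dominant_row_alt payoffs rows cols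
instance (payoffs : List (Int × Int × List Int)) (rows : List Int) (cols : List Int) (out : Option Int) : Decidable (Spec_weakly_dominant_row payoffs rows cols out) := by unfold Spec_weakly_dominant_row; infer_instance

-- ===== CLAIM (what is proved, stated in full; the proofs are below) =====
def Claim_equal_weakly_dominant_row : Prop := ∀ (payoffs : List (Int × Int × List Int)) (rows : List Int) (cols : List Int), Dom_weakly_dominant_row payoffs rows cols → Pre_weakly_dominant_row payoffs rows cols → Spec_weakly_dominant_row payoffs rows cols (weakly_dominant_row payoffs rows cols)

-- ===== LEMMAS AND PROOFS =====

-- r weakly dominates r2 (over the fixed column list)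
def WDom (P : List (Int × Int × List Int)) (cols : List Int) (r r2 : Int) : Prop :=
  (∀ c ∈ cols, pvVal P r2 c ≤ pvVal P r c) ∧ (∃ c ∈ cols, pvVal P r2 c < pvVal P r c)

theorem wdrInner_iff (P : List (Int × Int × List Int)) (r r2 : Int) :
    ∀ (cs : List Int) (sbe : Bool),
      wdrInner P r r2 cs sbe = true ↔
        ((∀ c ∈ cs, pvVal P r2 c ≤ pvVal P r c) ∧
          (sbe = true ∨ ∃ c ∈ cs, pvVal P r2 c < pvVal P r c)) := by
  intro cs
  induction cs with
  | nil => intro sbe; simp [wdrInner]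
  | cons c cs ih =>
    intro sbe
    by_cases h : pvVal P r c < pvVal P r2 c
    · constructor
      · intro hfalse; simp [wdrInner, h] at hfalse
      · rintro ⟨h1, _⟩
        exact absurd (h1 c (by simp)) (not_le.2 h)
    · simp only [wdrInner, if_neg h, ih]
      constructor
      · rintro ⟨h1, h2⟩
        refine ⟨?_, ?_⟩
        · intro x hx
          rcases List.mem_cons.1 hx with rfl | hx
          · omega
          · exact h1 x hx
        · rcases h2 with h2 | ⟨x, hx, hlt⟩
          · rcases Bool.or_eq_true_iff.1 h2 with h2 | h2
            · exact Or.inl h2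
            · exact Or.inr ⟨c, by simp, by simpa using of_decide_eq_true h2⟩
          · exact Or.inr ⟨x, List.mem_cons_of_mem _ hx, hlt⟩
      · rintro ⟨h1, h2⟩
        refine ⟨fun x hx => h1 x (List.mem_cons_of_mem _ hx), ?_⟩
        rcases h2 with h2 | ⟨x, hx, hlt⟩
        · exact Or.inl (by simp [h2])
        · rcases List.mem_cons.1 hx with rfl | hx
          · exact Or.inl (by simp [hlt])
          · exact Or.inr ⟨x, hx, hlt⟩

theorem wdrInner_dom (P : List (Int × Int × List Int)) (cols : List Int) (r r2 : Int) :
    wdrInner P r r2 cols false = true ↔ WDom P cols r r2 := by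
  rw [wdrInner_iff]
  simp [WDom]

theorem wdrMid_iff (P : List (Int × Int × List Int)) (r : Int) (cols : List Int) :
    ∀ l : List Int, wdrMid P r cols l = true ↔ ∀ r2 ∈ l, r2 ≠ r → WDom P cols r r2 := by
  intro l
  induction l with
  | nil => simp [wdrMid]
  | cons r2 rest ih =>
    by_cases h : r2 = r
    · subst h
      rw [wdrMid, if_pos rfl, ih]
      constructor
      · intro h' x hx hne
        rcases List.mem_cons.1 hx with rfl | hx
        · exact absurd rfl hne
        · exact h' x hx hne
      · intro h' x hx hne; exact h' x (List.mem_cons_of_mem _ hx) hne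
    · by_cases hd : wdrInner P r r2 cols false = true
      · rw [wdrMid, if_neg h, if_pos hd, ih]
        constructor
        · intro h' x hx hne
          rcases List.mem_cons.1 hx with rfl | hx
          · exact (wdrInner_dom P cols r x).1 hd
          · exact h' x hx hne
        · intro h' x hx hne; exact h' x (List.mem_cons_of_mem _ hx) hne
      · rw [wdrMid, if_neg h, if_neg hd]
        simp only [Bool.false_eq_true, false_iff]
        exact fun h' => absurd (h' r2 (by simp) h) (fun hw => hd ((wdrInner_dom P cols r r2).2 hw))

-- wdrOuter result characterisation
theorem wdrOuter_some (P : List (Int × Int × List Int)) (rows cols : List Int) :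
    ∀ (l : List Int) (y : Int), wdrOuter P rows cols l = some y →
      y ∈ l ∧ (∀ r2 ∈ rows, r2 ≠ y → WDom P cols y r2) := by
  intro l
  induction l with
  | nil => intro y h; simp [wdrOuter] at h
  | cons r rest ih =>
    intro y h
    by_cases hm : wdrMid P r cols rows = true
    · rw [wdrOuter, if_pos hm] at h
      obtain rfl : r = y := by exact Option.some.inj h
      exact ⟨by simp, (wdrMid_iff P r cols rows).1 hm⟩
    · rw [wdrOuter, if_neg hm] at h
      obtain ⟨hy, hg⟩ := ih y h
      exact ⟨List.mem_cons_of_mem _ hy, hg⟩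

theorem wdrOuter_none (P : List (Int × Int × List Int)) (rows cols : List Int) :
    ∀ l : List Int, wdrOuter P rows cols l = none →
      ∀ r ∈ l, ¬ (∀ r2 ∈ rows, r2 ≠ r → WDom P cols r r2) := by
  intro l
  induction l with
  | nil => simp
  | cons r rest ih =>
    intro h x hx
    by_cases hm : wdrMid P r cols rows = true
    · rw [wdrOuter, if_pos hm] at h; exact absurd h (by simp)
    · rw [wdrOuter, if_neg hm] at h
      rcases List.mem_cons.1 hx with rfl | hx
      · exact fun hg => hm ((wdrMid_iff P x cols rows).2 hg)
      · exact ih h x hx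

-- wdrDistinct facts
theorem wdrDistinct_aux (l acc : List Int) :
    (∀ x, x ∈ l.foldl (fun acc r => if r ∈ acc then acc else acc ++ [r]) acc ↔ x ∈ acc ∨ x ∈ l)
    ∧ (acc.Nodup → (l.foldl (fun acc r => if r ∈ acc then acc else acc ++ [r]) acc).Nodup) := by
  induction l generalizing acc with
  | nil => simp
  | cons r rest ih =>
    by_cases h : r ∈ acc
    · simp only [List.foldl_cons, if_pos h]
      refine ⟨fun x => ?_, (ih acc).2⟩
      rw [(ih acc).1 x]
      constructor
      · rintro (hx | hx)
        · exact Or.inl hx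
        · exact Or.inr (List.mem_cons_of_mem _ hx)
      · rintro (hx | hx)
        · exact Or.inl hx
        · rcases List.mem_cons.1 hx with rfl | hx
          · exact Or.inl h
          · exact Or.inr hx
    · simp only [List.foldl_cons, if_neg h]
      refine ⟨fun x => ?_, fun hnd => (ih (acc ++ [r])).2 ?_⟩
      · rw [(ih (acc ++ [r])).1 x]
        simp only [List.mem_append, List.mem_singleton, List.mem_cons]
        tauto
      · exact List.Nodup.append hnd (List.nodup_singleton r)
          (by intro a ha hb; simp at hb; subst hb; exact h ha)

theorem mem_wdrDistinct (rows : List Int) (x : Int) : x ∈ wdrDistinct rows ↔ x ∈ rows := by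
  have := (wdrDistinct_aux rows []).1 x
  simpa [wdrDistinct] using this

theorem nodup_wdrDistinct (rows : List Int) : (wdrDistinct rows).Nodup := by
  exact (wdrDistinct_aux rows []).2 (by simp)

-- colmax facts (d nonempty)
theorem wdrColMax_ge (P : List (Int × Int × List Int)) (d : List Int) (c : Int)
    (r : Int) (hr : r ∈ d) : pvVal P r c ≤ wdrColMax P d c := by
  have hne : d.map (fun r => pvVal P r c) ≠ [] := by simp; rintro rfl; simp at hr
  rcases hm : PySem.List.max? (d.map (fun r => pvVal P r c)) (fun x => x) with _ | m
  · exact absurd ((PySem.List.max?_eq_none_iff _ _).1 hm) hne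
  · have := PySem.List.max?_isMax hm (pvVal P r c) (by exact List.mem_map.2 ⟨r, hr, rfl⟩)
    simpa [wdrColMax, hm] using this

theorem wdrColMax_mem (P : List (Int × Int × List Int)) (d : List Int) (c : Int)
    (hne : d ≠ []) : ∃ r ∈ d, wdrColMax P d c = pvVal P r c := by
  rcases hm : PySem.List.max? (d.map (fun r => pvVal P r c)) (fun x => x) with _ | m
  · rw [PySem.List.max?_eq_none_iff] at hm
    simp at hm; exact absurd hm hne
  · have := PySem.List.max?_mem hm
    rcases List.mem_map.1 this with ⟨r, hr, hrm⟩
    exact ⟨r, hr, by simp [wdrColMax, hm, hrm]⟩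

-- the heart: for r ∈ rows, "r weakly dominates every other row" ↔ "r's vector is the column-max
-- vector and no other distinct row's vector is"
theorem good_iff (P : List (Int × Int × List Int)) (rows cols : List Int) (r : Int)
    (hr : r ∈ rows) :
    (∀ r2 ∈ rows, r2 ≠ r → WDom P cols r r2) ↔
      (cols.map (fun c => pvVal P r c) = cols.map (fun c => wdrColMax P (wdrDistinct rows) c) ∧
        ∀ r' ∈ wdrDistinct rows, r' ≠ r →
          cols.map (fun c => pvVal P r' c) ≠ cols.map (fun c => wdrColMax P (wdrDistinct rows) c)) := by
  set d := wdrDistinct rows with hd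
  have hdne : d ≠ [] := by
    intro h
    have := (mem_wdrDistinct rows r).2 hr
    rw [← hd] at this; simp [h] at this
  constructor
  · intro hg
    have hvec : ∀ c ∈ cols, pvVal P r c = wdrColMax P d c := by
      intro c hc
      have hle : pvVal P r c ≤ wdrColMax P d c :=
        wdrColMax_ge P d c r ((mem_wdrDistinct rows r).2 hr)
      obtain ⟨r0, hr0, he⟩ := wdrColMax_mem P d c hdne
      have hr0r : r0 ∈ rows := (mem_wdrDistinct rows r0).1 hr0
      by_cases h0 : r0 = r
      · subst h0; omega
      · have := (hg r0 hr0r h0).1 c hc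
        omega
    constructor
    · exact List.map_eq_map_iff.2 hvec
    · intro r' hr' hne hcontra
      have hr'r : r' ∈ rows := (mem_wdrDistinct rows r').1 hr'
      obtain ⟨c, hc, hlt⟩ := (hg r' hr'r hne).2
      have h1 : pvVal P r' c = wdrColMax P d c := List.map_eq_map_iff.1 hcontra c hc
      have h2 : pvVal P r c = wdrColMax P d c := hvec c hc
      omega
  · rintro ⟨hvec, huniq⟩ r2 hr2 hne
    have hveq : ∀ c ∈ cols, pvVal P r c = wdrColMax P d c := List.map_eq_map_iff.1 hvec
    have hr2d : r2 ∈ d := (mem_wdrDistinct rows r2).2 hr2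
    constructor
    · intro c hc
      have := wdrColMax_ge P d c r2 hr2d
      have := hveq c hc
      omega
    · have hne2 := huniq r2 hr2d hne
      have : ¬ ∀ c ∈ cols, pvVal P r2 c = wdrColMax P d c := by
        intro h; exact hne2 (List.map_eq_map_iff.2 h)
      push_neg at this
      obtain ⟨c, hc, hnev⟩ := this
      refine ⟨c, hc, ?_⟩
      have := wdrColMax_ge P d c r2 hr2d
      have := hveq c hc
      omega

-- ===== VERDICT (by name: the statement is the Claim_ definition above) =====
theorem weakly_dominant_row_spec : Claim_equal_weakly_dominant_row := by
  intro P rows cols _ _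
  unfold Spec_weakly_dominant_row
  show wdrOuter P rows cols rows = weakly_dominant_row_alt P rows cols
  unfold weakly_dominant_row_alt
  by_cases hlen : (wdrDistinct rows).length ≤ 1
  · rw [if_pos hlen]
    cases rows with
    | nil => rfl
    | cons r rest =>
      have hall : ∀ x ∈ (r :: rest), x = r := by
        intro x hx
        have hxd := (mem_wdrDistinct (r :: rest) x).2 hx
        have hrd := (mem_wdrDistinct (r :: rest) r).2 (by simp)
        rcases hdc : wdrDistinct (r :: rest) with _ | ⟨a, tl⟩
        · rw [hdc] at hxd; simp at hxd
        · rw [hdc] at hxd hrd hlen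
          have htl : tl = [] := by
            have := List.length_cons (a := a) (as := tl)
            exact List.eq_nil_of_length_eq_zero (by omega)
          subst htl
          simp at hxd hrd
          rw [hxd, hrd]
      have hmid : wdrMid P r cols (r :: rest) = true := by
        rw [wdrMid_iff]
        intro r2 h2 hne
        exact absurd ((hall r2 h2).trans (hall r (by simp)).symm) hne
      simp [wdrOuter, hmid]
  · rw [if_neg hlen]
    have hnodup := nodup_wdrDistinct rows
    have hmemb : ∀ x, x ∈ (wdrDistinct rows).filter
        (fun r => cols.map (fun c => pvVal P r c) == cols.map (fun c => wdrColMax P (wdrDistinct rows) c)) ↔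
        (x ∈ wdrDistinct rows ∧
          cols.map (fun c => pvVal P x c) = cols.map (fun c => wdrColMax P (wdrDistinct rows) c)) := by
      intro x
      rw [List.mem_filter]
      simp only [beq_iff_eq]
    rcases hA : wdrOuter P rows cols rows with _ | y
    · -- A returned None: no row weakly dominates, so best cannot be a singleton
      have hnog := wdrOuter_none P rows cols rows hA
      have hone : ((wdrDistinct rows).filter
          (fun r => cols.map (fun c => pvVal P r c) == cols.map (fun c => wdrColMax P (wdrDistinct rows) c))).length ≠ 1 := by
        intro hlen1
        obtain ⟨b, hb⟩ := List.length_eq_one_iff.1 hlen1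
        have hbmem : b ∈ (wdrDistinct rows).filter
            (fun r => cols.map (fun c => pvVal P r c) == cols.map (fun c => wdrColMax P (wdrDistinct rows) c)) := by
          rw [hb]; simp
        obtain ⟨hbd, hbvec⟩ := (hmemb b).1 hbmem
        have hgood : ∀ r2 ∈ rows, r2 ≠ b → WDom P cols b r2 := by
          rw [good_iff P rows cols b ((mem_wdrDistinct rows b).1 hbd)]
          refine ⟨hbvec, ?_⟩
          intro r' hr' hne hvec'
          have hmem' : r' ∈ (wdrDistinct rows).filter
              (fun r => cols.map (fun c => pvVal P r c) == cols.map (fun c => wdrColMax P (wdrDistinct rows) c)) :=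
            (hmemb r').2 ⟨hr', hvec'⟩
          rw [hb] at hmem'; simp at hmem'; exact hne hmem'
        exact hnog b ((mem_wdrDistinct rows b).1 hbd) hgood
      have : (((wdrDistinct rows).filter
          (fun r => cols.map (fun c => pvVal P r c) == cols.map (fun c => wdrColMax P (wdrDistinct rows) c))).length == 1) = false := by
        simpa using hone
      show none = if (((wdrDistinct rows).filter (fun r => cols.map (fun c => pvVal P r c) == cols.map (fun c => wdrColMax P (wdrDistinct rows) c))).length == 1) then ((wdrDistinct rows).filter (fun r => cols.map (fun c => pvVal P r c) == cols.map (fun c => wdrColMax P (wdrDistinct rows) c))).head? else none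
      rw [this]
      rfl
    · -- A returned some y: y is the unique best row
      obtain ⟨hy, hgood⟩ := wdrOuter_some P rows cols rows y hA
      obtain ⟨hvy, huniq⟩ := (good_iff P rows cols y hy).1 hgood
      have hyb : y ∈ (wdrDistinct rows).filter
          (fun r => cols.map (fun c => pvVal P r c) == cols.map (fun c => wdrColMax P (wdrDistinct rows) c)) :=
        (hmemb y).2 ⟨(mem_wdrDistinct rows y).2 hy, hvy⟩
      have hall : ∀ x ∈ (wdrDistinct rows).filter
          (fun r => cols.map (fun c => pvVal P r c) == cols.map (fun c => wdrColMax P (wdrDistinct rows) c)), x = y := by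
        intro x hx
        obtain ⟨hxd, hxv⟩ := (hmemb x).1 hx
        by_contra hne
        exact huniq x hxd hne hxv
      have hbest : (wdrDistinct rows).filter
          (fun r => cols.map (fun c => pvVal P r c) == cols.map (fun c => wdrColMax P (wdrDistinct rows) c)) = [y] := by
        have hnd := hnodup.filter
          (fun r => cols.map (fun c => pvVal P r c) == cols.map (fun c => wdrColMax P (wdrDistinct rows) c))
        cases hbc : (wdrDistinct rows).filter
            (fun r => cols.map (fun c => pvVal P r c) == cols.map (fun c => wdrColMax P (wdrDistinct rows) c)) with
        | nil => rw [hbc] at hyb; simp at hyb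
        | cons b tl =>
          rw [hbc] at hall hnd
          have hb1 : b = y := hall b (by simp)
          cases tl with
          | nil => rw [hb1]
          | cons b2 tl2 =>
            have hb2 : b2 = y := hall b2 (by simp)
            rw [List.nodup_cons] at hnd
            exact absurd (show b ∈ b2 :: tl2 by rw [hb1, hb2]; exact List.mem_cons_self ..) hnd.1
      show some y = if (((wdrDistinct rows).filter (fun r => cols.map (fun c => pvVal P r c) == cols.map (fun c => wdrColMax P (wdrDistinct rows) c))).length == 1) then ((wdrDistinct rows).filter (fun r => cols.map (fun c => pvVal P r c) == cols.map (fun c => wdrColMax P (wdrDistinct rows) c))).head? else none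
      rw [hbest]
      rfl
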